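-- pv_equiv track=rewrite | github.com/csrawat/AutoBuild | publish.py | getNewVersion
-- ===== SOURCE A (Python) =====
-- def getNewVersion(current_version):
--     new_version = ""
--
--     carry = 1
--     for n in reversed(current_version.split(".")):
--         new_n = (int(n) + carry) % 1000
--         carry = (int(n) + carry) // 1000
--         new_version = new_version + str(new_n) + "."
--
--     # remove last '.'
--     new_version = new_version[:-1]
--
--     new_version = ".".join(reversed(new_version.split(".")))
--
--     return new_version
-- ===== SOURCE B (Python) =====
-- def getNewVersion(current_version):
--     # Encode the whole version as one base-1000 integer, add 1, decode back.
--     parts = current_version.split(".")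
--     value = 0
--     for p in parts:
--         value = value * 1000 + int(p)
--     value += 1
--     comps = []
--     for _ in parts:
--         comps.append(str(value % 1000))
--         value //= 1000
--     return ".".join(reversed(comps))
-- ===== Notes on version B (the rewrite author's own statement) =====
-- stated objective: simpler
-- what changed: Instead of a digit-by-digit loop with an explicit carry that builds a reversed string and then splits/reverses/rejoins it, B encodes the whole version as a single base-1000 integer, adds 1, and decodes exactly len(parts) components back with floor divmod; Python's floor // and % reproduce the carry chain, leading-zero stripping and dropped top carry exactly.
import Mathlib
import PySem

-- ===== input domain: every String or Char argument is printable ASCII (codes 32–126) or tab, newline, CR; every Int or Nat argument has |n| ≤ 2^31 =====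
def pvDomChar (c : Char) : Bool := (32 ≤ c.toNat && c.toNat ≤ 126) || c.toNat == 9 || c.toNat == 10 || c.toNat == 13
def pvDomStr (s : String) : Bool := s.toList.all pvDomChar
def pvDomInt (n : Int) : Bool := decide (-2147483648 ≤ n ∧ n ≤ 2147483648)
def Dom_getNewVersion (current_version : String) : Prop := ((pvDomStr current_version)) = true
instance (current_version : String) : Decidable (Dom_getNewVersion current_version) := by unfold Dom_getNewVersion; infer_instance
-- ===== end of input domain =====

-- B replaces A's explicit carry loop + string split/reverse/join by one base-1000 integer encode / +1 / decode (simpler; same cost).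


-- ===== PORT A =====
-- the for-loop over reversed(current_version.split(".")); `none` = the ValueError of int(n)
def pvALoop : List (List Char) → Int → List Char → Option (List Char)
  | [], _, nv => some nv
  | n :: rest, carry, nv =>
    match PySem.Int.ofChars? n with
    | none => none
    | some x =>
        pvALoop rest (PySem.Int.floordiv (x + carry) 1000)
          (nv ++ PySem.Int.toChars (PySem.Int.mod (x + carry) 1000) ++ ['.'])

def getNewVersion (current_version : String) : String :=
  match pvALoop (PySem.Chars.splitOn current_version.toList ['.']).reverse 1 [] with
  | none => ""   -- int(n) raised ValueError: these inputs are excluded by Pre_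
  | some nv =>
      String.ofList (PySem.Chars.join ['.']
        (PySem.Chars.splitOn (PySem.List.slice nv none (some (-1))) ['.']).reverse)

-- ===== PORT B =====
-- value = value * 1000 + int(p) over the parts; `none` = the ValueError of int(p)
def pvBValue : List (List Char) → Int → Option Int
  | [], v => some v
  | p :: rest, v =>
    match PySem.Int.ofChars? p with
    | none => none
    | some x => pvBValue rest (v * 1000 + x)

-- comps.append(str(value % 1000)); value //= 1000 — once per part
def pvBComps : List (List Char) → Int → List (List Char)
  | [], _ => []
  | _ :: rest, v =>
      PySem.Int.toChars (PySem.Int.mod v 1000) :: pvBComps rest (PySem.Int.floordiv v 1000)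

def getNewVersion_alt (current_version : String) : String :=
  let parts := PySem.Chars.splitOn current_version.toList ['.']
  match pvBValue parts 0 with
  | none => ""
  | some v => String.ofList (PySem.Chars.join ['.'] (pvBComps parts (v + 1)).reverse)

-- ===== PRECONDITION & SPEC =====
-- Pre_ excludes exactly the inputs where int(n) raises ValueError on some dot-separated part.
def Pre_getNewVersion (current_version : String) : Prop :=
  ∀ p ∈ PySem.Chars.splitOn current_version.toList ['.'], (PySem.Int.ofChars? p).isSome = true
instance (current_version : String) : Decidable (Pre_getNewVersion current_version) := by
  unfold Pre_getNewVersion; infer_instance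

def pvWitness_getNewVersion : String := "1.2.3"

def Spec_getNewVersion (current_version : String) (out : String) : Prop := out = getNewVersion_alt current_version
instance (current_version : String) (out : String) : Decidable (Spec_getNewVersion current_version out) := by unfold Spec_getNewVersion; infer_instance

-- ===== CLAIM (what is proved, stated in full; the proofs are below) =====
def Claim_equal_getNewVersion : Prop := ∀ (current_version : String), Dom_getNewVersion current_version → Pre_getNewVersion current_version → Spec_getNewVersion current_version (getNewVersion current_version)

-- ===== LEMMAS AND PROOFS =====

-- digits of v in base 1000, low to high, n of them, as strings
def pvDig : Nat → Int → List (List Char)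
  | 0, _ => []
  | n + 1, v =>
      PySem.Int.toChars (PySem.Int.mod v 1000) :: pvDig n (PySem.Int.floordiv v 1000)

def pvFold (c : Int) (xs : List Int) : Int := xs.foldl (fun a x => a * 1000 + x) c

theorem pvBValue_eq (ps : List (List Char)) (v : Int)
    (h : ∀ p ∈ ps, (PySem.Int.ofChars? p).isSome = true) :
    pvBValue ps v = some (pvFold v (ps.map (fun p => (PySem.Int.ofChars? p).getD 0))) := by
  induction ps generalizing v with
  | nil => simp [pvBValue, pvFold]
  | cons p rest ih =>
    have hp := h p (by simp)
    obtain ⟨x, hx⟩ := Option.isSome_iff_exists.mp hp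
    simp only [pvBValue, hx]
    rw [ih _ (fun q hq => h q (by simp [hq]))]
    simp [pvFold, hx]

theorem pvBComps_eq (ps : List (List Char)) (v : Int) :
    pvBComps ps v = pvDig ps.length v := by
  induction ps generalizing v with
  | nil => simp [pvBComps, pvDig]
  | cons p rest ih => simp [pvBComps, pvDig, ih]

theorem pvMod1000 (V t : Int) : PySem.Int.mod (V * 1000 + t) 1000 = PySem.Int.mod t 1000 := by
  simp only [PySem.Int.mod_eq_emod_of_pos (show (0:Int) < 1000 by norm_num)]
  omega

theorem pvDiv1000 (V t : Int) :
    PySem.Int.floordiv (V * 1000 + t) 1000 = V + PySem.Int.floordiv t 1000 := by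
  simp only [PySem.Int.floordiv_eq_ediv_of_pos (show (0:Int) < 1000 by norm_num)]
  omega

-- A's carry chain, run right-to-left over ys, is the base-1000 decode of (value of ys) + carry
def pvADig : List Int → Int → List (List Char)
  | [], _ => []
  | x :: rest, c =>
      PySem.Int.toChars (PySem.Int.mod (x + c) 1000)
        :: pvADig rest (PySem.Int.floordiv (x + c) 1000)

theorem pvADig_eq (ys : List Int) (c : Int) :
    pvADig ys c = pvDig ys.length (pvFold 0 ys.reverse + c) := by
  induction ys generalizing c with
  | nil => simp [pvADig, pvDig]
  | cons x rest ih =>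
    have hV : pvFold 0 (x :: rest).reverse = pvFold 0 rest.reverse * 1000 + x := by
      simp [pvFold, List.foldl_append]
    simp only [pvADig, ih, List.length_cons, pvDig, hV]
    rw [show pvFold 0 rest.reverse * 1000 + x + c = pvFold 0 rest.reverse * 1000 + (x + c) by ring,
        pvMod1000, pvDiv1000]

theorem pvALoop_eq (ps : List (List Char)) (c : Int) (nv : List Char)
    (h : ∀ p ∈ ps, (PySem.Int.ofChars? p).isSome = true) :
    pvALoop ps c nv =
      some (nv ++ (pvADig (ps.map (fun p => (PySem.Int.ofChars? p).getD 0)) c).flatMap (· ++ ['.'])) := by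
  induction ps generalizing c nv with
  | nil => simp [pvALoop, pvADig]
  | cons p rest ih =>
    have hp := h p (by simp)
    obtain ⟨x, hx⟩ := Option.isSome_iff_exists.mp hp
    simp only [pvALoop, hx, ih _ _ (fun q hq => h q (by simp [hq])), List.map_cons,
      Option.getD_some, pvADig, List.flatMap_cons, List.append_assoc]

set_option maxRecDepth 10000 in
theorem pvDigitChars : ∀ n < 1000, '.' ∉ Nat.toDigits 10 n := by decide

theorem pvDig_dot_free (n : Nat) (v : Int) : ∀ p ∈ pvDig n v, '.' ∉ p := by
  induction n generalizing v with
  | zero => simp [pvDig]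
  | succ m ih =>
    intro p hp
    simp only [pvDig, List.mem_cons] at hp
    rcases hp with rfl | hp
    · have h0 : (0:Int) ≤ PySem.Int.mod v 1000 := PySem.Int.mod_nonneg v (by norm_num)
      have h1 : PySem.Int.mod v 1000 < 1000 := PySem.Int.mod_lt v (by norm_num)
      have : ¬ PySem.Int.mod v 1000 < 0 := by omega
      simp only [PySem.Int.toChars, this, if_false]
      exact pvDigitChars _ (by omega)
    · exact ih _ p hp

theorem pvDropLast_flatMap (ds : List (List Char)) (h : ds ≠ []) :
    (ds.flatMap (· ++ ['.'])).dropLast = PySem.Chars.join ['.'] ds := by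
  induction ds with
  | nil => simp at h
  | cons d rest ih =>
    cases rest with
    | nil => simp [PySem.Chars.join, List.intercalate]
    | cons d2 rest2 =>
      have hne : (d2 :: rest2).flatMap (· ++ ['.']) ≠ [] := by
        simp [List.flatMap_cons]
      rw [List.flatMap_cons, List.dropLast_append_of_ne_nil hne, ih (by simp),
        PySem.Chars.join_cons_cons]

-- PySem.Chars.splitOn with a single-char separator is core List.splitOn
theorem pvGo_eq (fuel : Nat) (l cur : List Char) (acc : List (List Char)) (hf : l.length < fuel) :
    PySem.Chars.splitOn.go ['.'] fuel l cur acc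
      = acc.reverse ++ List.splitOnP.go (· == '.') l cur := by
  induction fuel generalizing l cur acc with
  | zero => omega
  | succ f ih =>
    cases l with
    | nil => simp [PySem.Chars.splitOn.go, List.splitOnP.go]
    | cons c rest =>
      by_cases hc : c = '.'
      · subst hc
        have hpre : List.isPrefixOf ['.'] ('.' :: rest) = true := by
          simp [List.isPrefixOf]
        simp only [PySem.Chars.splitOn.go, List.splitOnP.go, hpre, if_true, beq_self_eq_true,
          List.length_singleton, List.drop_succ_cons, List.drop_zero]
        rw [ih _ _ _ (by simp at hf ⊢; omega)]
        simp
      · have hpre : List.isPrefixOf ['.'] (c :: rest) = false := by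
          simp [List.isPrefixOf]
          exact fun h => hc h.symm
        have hP : (c == '.') = false := by simpa using hc
        simp only [PySem.Chars.splitOn.go, List.splitOnP.go, hpre, hP, if_false, Bool.false_eq_true]
        exact ih _ _ _ (by simp at hf ⊢; omega)

theorem pvSplitOn_eq (s : List Char) :
    PySem.Chars.splitOn s ['.'] = s.splitOn '.' := by
  rw [PySem.Chars.splitOn, pvGo_eq _ _ _ _ (Nat.lt_succ_self _)]
  rfl

theorem pvSlice_dropLast (cs : List Char) :
    PySem.List.slice cs none (some (-1)) = cs.dropLast :=
  PySem.List.slice_to_neg_one cs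

theorem pvRoundTrip (ds : List (List Char)) (hne : ds ≠ []) (hdot : ∀ p ∈ ds, '.' ∉ p) :
    PySem.Chars.splitOn (PySem.List.slice (ds.flatMap (· ++ ['.'])) none (some (-1))) ['.'] = ds := by
  rw [pvSlice_dropLast, pvDropLast_flatMap ds hne, pvSplitOn_eq]
  have : PySem.Chars.join ['.'] ds = ['.'].intercalate ds := rfl
  rw [this]
  exact List.splitOn_intercalate ds '.' hdot hne

theorem pvSplitOn_ne_nil (s : List Char) : PySem.Chars.splitOn s ['.'] ≠ [] := by
  rw [pvSplitOn_eq]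
  exact List.splitOnP_ne_nil _ s

-- ===== VERDICT (by name: the statement is the Claim_ definition above) =====
theorem getNewVersion_spec : Claim_equal_getNewVersion := by
  intro cv _hdom hpre
  unfold Spec_getNewVersion getNewVersion getNewVersion_alt
  have hall : ∀ p ∈ PySem.Chars.splitOn cv.toList ['.'], (PySem.Int.ofChars? p).isSome = true := hpre
  have hrev : ∀ p ∈ (PySem.Chars.splitOn cv.toList ['.']).reverse,
      (PySem.Int.ofChars? p).isSome = true := fun p hp => hall p (List.mem_reverse.mp hp)
  dsimp only
  rw [pvALoop_eq _ _ _ hrev, pvBValue_eq _ _ hall]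
  dsimp only
  rw [List.map_reverse, pvADig_eq, pvBComps_eq]
  simp only [List.length_reverse, List.reverse_reverse, List.length_map, List.nil_append]
  have hne : pvDig (PySem.Chars.splitOn cv.toList ['.']).length
      (pvFold 0 (List.map (fun p => (PySem.Int.ofChars? p).getD 0)
        (PySem.Chars.splitOn cv.toList ['.'])) + 1) ≠ [] := by
    have h := pvSplitOn_ne_nil cv.toList
    cases hp : PySem.Chars.splitOn cv.toList ['.'] with
    | nil => exact absurd hp h
    | cons a b => simp [pvDig]
  rw [pvRoundTrip _ hne (pvDig_dot_free _ _)]
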